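-- pv_equiv track=rewrite | github.com/dnlgmlcks/FINANCE_DOT_ZIP | backend/src/ai/backend_payload_adapter.py | choose_base_year
-- ===== SOURCE A (Python) =====
-- from typing import Any, Dict, List, Optional, Tuple
--
-- def get_available_years(finance_summary: List[Dict[str, Any]]) -> List[int]:
--     """
--     finance_summary에 존재하는 연도 목록을 반환합니다.
--     """
--
--     years = []
--
--     for row in finance_summary or []:
--         year = row.get("year")
--
--         if isinstance(year, int):
--             years.append(year)
--
--     return sorted(set(years))
--
-- def choose_base_year(
--     finance_summary: List[Dict[str, Any]],
--     analysis_year: Optional[int],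
-- ) -> Optional[int]:
--     """
--     비교 기준 연도를 결정합니다.
--     """
--
--     if analysis_year is None:
--         return None
--
--     years = get_available_years(finance_summary)
--     preferred_base_year = analysis_year - 1
--
--     if preferred_base_year in years:
--         return preferred_base_year
--
--     previous_years = [year for year in years if year < analysis_year]
--
--     if previous_years:
--         return max(previous_years)
--
--     return preferred_base_year
-- ===== SOURCE B (Python) =====
-- def choose_base_year(finance_summary, analysis_year):
--     if analysis_year is None:
--         return None
--     best = None
--     for row in finance_summary or []:
--         year = row.get("year")
--         if isinstance(year, int) and year < analysis_year:
--             if best is None or year > best: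
--                 best = year
--     return best if best is not None else analysis_year - 1
-- ===== Notes on version B (the rewrite author's own statement) =====
-- stated objective: simpler
-- what changed: Replaces the build-sorted-set / membership-test / filter-then-max three-pass pipeline with a single running-max scan over the rows, falling back to analysis_year-1 when no earlier year exists.
import Mathlib
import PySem

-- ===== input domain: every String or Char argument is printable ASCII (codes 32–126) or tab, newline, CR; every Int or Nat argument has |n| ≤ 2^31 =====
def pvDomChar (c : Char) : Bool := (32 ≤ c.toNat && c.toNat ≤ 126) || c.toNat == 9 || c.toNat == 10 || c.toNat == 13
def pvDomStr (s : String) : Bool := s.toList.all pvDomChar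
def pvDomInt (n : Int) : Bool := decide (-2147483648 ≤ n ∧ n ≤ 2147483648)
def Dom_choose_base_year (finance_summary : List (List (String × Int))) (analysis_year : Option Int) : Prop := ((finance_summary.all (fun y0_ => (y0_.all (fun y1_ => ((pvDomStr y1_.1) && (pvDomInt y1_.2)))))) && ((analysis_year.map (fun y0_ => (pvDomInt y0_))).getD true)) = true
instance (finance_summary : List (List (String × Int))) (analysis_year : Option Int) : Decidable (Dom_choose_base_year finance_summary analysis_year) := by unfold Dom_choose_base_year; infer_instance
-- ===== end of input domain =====

-- ===== PORT A =====
-- B changes only the return value computation strategy; no arguments are mutated.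
-- get_available_years: collect row.get("year") (values are Int here, so the isinstance(int) check always holds), then sorted(set(...))
def get_available_years (finance_summary : List (List (String × Int))) : List Int :=
  let years := finance_summary.foldl (fun acc row =>
    match PySem.Dict.get? (PySem.Dict.mk row) "year" with
    | some y => acc ++ [y]
    | none => acc) []
  PySem.List.sorted (PySem.Set.ofList years) (fun x => x) false

def choose_base_year (finance_summary : List (List (String × Int))) (analysis_year : Option Int) : Option Int :=
  match analysis_year with
  | none => none
  | some ay =>
    let years := get_available_years finance_summary
    let preferred_base_year := ay - 1
    if preferred_base_year ∈ years then some preferred_base_year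
    else
      let previous_years := years.filter (fun y => decide (y < ay))
      match PySem.List.max? previous_years (fun x => x) with
      | some m => some m
      | none => some preferred_base_year

-- ===== PORT B =====
-- one step of B's loop body: update the running best with a candidate year
def updBest (ay : Int) (best : Option Int) (row : List (String × Int)) : Option Int :=
  match PySem.Dict.get? (PySem.Dict.mk row) "year" with
  | some y =>
    if y < ay then
      match best with
      | none => some y
      | some b => if y > b then some y else some b
    else best
  | none => best

def choose_base_year_alt (finance_summary : List (List (String × Int))) (analysis_year : Option Int) : Option Int :=
  match analysis_year with
  | none => none
  | some ay =>
    match finance_summary.foldl (updBest ay) none with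
    | some b => some b
    | none => some (ay - 1)

-- ===== PRECONDITION & SPEC =====
def Spec_choose_base_year (finance_summary : List (List (String × Int))) (analysis_year : Option Int) (out : Option Int) : Prop := out = choose_base_year_alt finance_summary analysis_year
instance (finance_summary : List (List (String × Int))) (analysis_year : Option Int) (out : Option Int) : Decidable (Spec_choose_base_year finance_summary analysis_year out) := by unfold Spec_choose_base_year; infer_instance

-- ===== CLAIM (what is proved, stated in full; the proofs are below) =====
def Claim_equal_choose_base_year : Prop := ∀ (finance_summary : List (List (String × Int))) (analysis_year : Option Int), Dom_choose_base_year finance_summary analysis_year → Spec_choose_base_year finance_summary analysis_year (choose_base_year finance_summary analysis_year)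

-- ===== LEMMAS AND PROOFS =====

-- the years A collects, as a filterMap
lemma yearsA_eq (rows : List (List (String × Int))) (acc : List Int) :
    rows.foldl (fun acc row =>
      match PySem.Dict.get? (PySem.Dict.mk row) "year" with
      | some y => acc ++ [y]
      | none => acc) acc = acc ++ rows.filterMap (fun row => PySem.Dict.get? (PySem.Dict.mk row) "year") := by
  induction rows generalizing acc with
  | nil => simp
  | cons r t ih =>
    simp only [List.foldl_cons, List.filterMap_cons]
    cases h : PySem.Dict.get? (PySem.Dict.mk r) "year" with
    | none => simp [ih]
    | some y => simp [ih]

-- invariant of B's running-max fold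
lemma foldBest_spec (ay : Int) (rows : List (List (String × Int))) : ∀ (best : Option Int),
    (∀ b, best = some b → b < ay) →
    (let ys := rows.filterMap (fun row => PySem.Dict.get? (PySem.Dict.mk row) "year")
     match rows.foldl (updBest ay) best with
     | none => best = none ∧ ∀ x ∈ ys, ¬ x < ay
     | some m => m < ay ∧ (best = some m ∨ m ∈ ys) ∧ (∀ b, best = some b → b ≤ m) ∧ ∀ x ∈ ys, x < ay → x ≤ m) := by
  induction rows with
  | nil =>
    intro best hb
    cases best with
    | none => simp
    | some b => simpa using hb b rfl
  | cons r t ih =>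
    intro best hb
    simp only [List.foldl_cons, List.filterMap_cons]
    cases hg : PySem.Dict.get? (PySem.Dict.mk r) "year" with
    | none =>
      have hstep : updBest ay best r = best := by simp [updBest, hg]
      rw [hstep]
      exact ih best hb
    | some y =>
      by_cases hy : y < ay
      · cases best with
        | none =>
          have hstep : updBest ay none r = some y := by simp [updBest, hg, hy]
          rw [hstep]
          have hb' : ∀ b, (some y : Option Int) = some b → b < ay := by
            intro b hbe; injection hbe with hbe; omega
          have hrec := ih (some y) hb'
          cases hf : t.foldl (updBest ay) (some y) with
          | none => rw [hf] at hrec; simp at hrec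
          | some m =>
            rw [hf] at hrec
            simp only at hrec ⊢
            obtain ⟨h1, h2, h3, h4⟩ := hrec
            refine ⟨h1, ?_, ?_, ?_⟩
            · right
              rw [List.mem_cons]
              rcases h2 with h | h
              · left; injection h with h; omega
              · right; exact h
            · intro b hbe; exact absurd hbe (by simp)
            · intro x hx hxlt
              rw [List.mem_cons] at hx
              rcases hx with hx | hx
              · subst hx; exact h3 _ rfl
              · exact h4 x hx hxlt
        | some b =>
          have hblt : b < ay := hb b rfl
          have hstep : updBest ay (some b) r = some (if b < y then y else b) := by
            by_cases hby : b < y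
            · simp [updBest, hg, hy, hby]
            · have : ¬ y > b := hby
              simp [updBest, hg, hy, hby]
          rw [hstep]
          have hnblt : (if b < y then y else b) < ay := by split_ifs <;> omega
          have hb' : ∀ c, (some (if b < y then y else b) : Option Int) = some c → c < ay := by
            intro c hc; injection hc with hc; omega
          have hrec := ih (some (if b < y then y else b)) hb'
          cases hf : t.foldl (updBest ay) (some (if b < y then y else b)) with
          | none => rw [hf] at hrec; simp at hrec
          | some m =>
            rw [hf] at hrec
            simp only at hrec ⊢
            obtain ⟨h1, h2, h3, h4⟩ := hrec
            have hnbm : (if b < y then y else b) ≤ m := h3 _ rfl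
            have hym : y ≤ m := by split_ifs at hnbm <;> omega
            have hbm : b ≤ m := by split_ifs at hnbm <;> omega
            refine ⟨h1, ?_, ?_, ?_⟩
            · rcases h2 with h | h
              · injection h with h
                by_cases hby : b < y
                · right; rw [List.mem_cons]; left; rw [if_pos hby] at h; omega
                · left; rw [if_neg hby] at h; rw [h]
              · right; rw [List.mem_cons]; right; exact h
            · intro c hc; injection hc with hc; omega
            · intro x hx hxlt
              rw [List.mem_cons] at hx
              rcases hx with hx | hx
              · omega
              · exact h4 x hx hxlt
      · have hstep : updBest ay best r = best := by simp [updBest, hg, hy]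
        rw [hstep]
        have hrec := ih best hb
        cases hf : t.foldl (updBest ay) best with
        | none =>
          rw [hf] at hrec
          simp only at hrec ⊢
          refine ⟨hrec.1, ?_⟩
          intro x hx
          rw [List.mem_cons] at hx
          rcases hx with hx | hx
          · subst hx; exact hy
          · exact hrec.2 x hx
        | some m =>
          rw [hf] at hrec
          simp only at hrec ⊢
          obtain ⟨h1, h2, h3, h4⟩ := hrec
          refine ⟨h1, ?_, h3, ?_⟩
          · rcases h2 with h | h
            · left; exact h
            · right; rw [List.mem_cons]; right; exact h
          · intro x hx hxlt
            rw [List.mem_cons] at hx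
            rcases hx with hx | hx
            · subst hx; omega
            · exact h4 x hx hxlt

-- membership in A's sorted-set years list is membership in the collected years
lemma mem_yearsA (rows : List (List (String × Int))) (x : Int) :
    x ∈ get_available_years rows ↔ x ∈ rows.filterMap (fun row => PySem.Dict.get? (PySem.Dict.mk row) "year") := by
  unfold get_available_years
  rw [PySem.List.mem_sorted, PySem.Set.mem_ofList, yearsA_eq]
  simp

-- ===== VERDICT (by name: the statement is the Claim_ definition above) =====
theorem choose_base_year_spec : Claim_equal_choose_base_year := by
  intro rows analysis_year _
  unfold Spec_choose_base_year choose_base_year choose_base_year_alt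
  cases analysis_year with
  | none => rfl
  | some ay =>
    simp only
    set ys := rows.filterMap (fun row => PySem.Dict.get? (PySem.Dict.mk row) "year") with hys
    have hspec := foldBest_spec ay rows none (by simp)
    simp only [← hys] at hspec
    cases hf : rows.foldl (updBest ay) none with
    | none =>
      rw [hf] at hspec
      obtain ⟨-, hnone⟩ := hspec
      -- no year < ay exists: A's membership test fails and its filter is empty
      have hmem : (ay - 1) ∉ get_available_years rows := by
        intro hm
        exact hnone _ ((mem_yearsA rows _).mp hm) (by omega)
      rw [if_neg hmem]
      have hfilt : (get_available_years rows).filter (fun y => decide (y < ay)) = [] := by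
        rw [List.filter_eq_nil_iff]
        intro x hx
        simpa using hnone x ((mem_yearsA rows x).mp hx)
      rw [hfilt]
      simp [PySem.List.max?]
    | some m =>
      rw [hf] at hspec
      obtain ⟨hmlt, hmem', hub', hmax⟩ := hspec
      have hmmem : m ∈ ys := hmem'.resolve_left (by simp)
      by_cases hp : (ay - 1) ∈ get_available_years rows
      · rw [if_pos hp]
        have hple : ay - 1 ≤ m := hmax _ ((mem_yearsA rows _).mp hp) (by omega)
        have : m = ay - 1 := by omega
        rw [this]
      · rw [if_neg hp]
        -- the filtered list contains m, so max? is some; its value is m by antisymmetry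
        have hmfilt : m ∈ (get_available_years rows).filter (fun y => decide (y < ay)) := by
          rw [List.mem_filter]
          exact ⟨(mem_yearsA rows m).mpr hmmem, by simpa using hmlt⟩
        cases hmx : PySem.List.max? ((get_available_years rows).filter (fun y => decide (y < ay))) (fun x => x) with
        | none =>
          rw [PySem.List.max?_eq_none_iff] at hmx
          rw [hmx] at hmfilt; simp at hmfilt
        | some k =>
          have hkmem := PySem.List.max?_mem hmx
          rw [List.mem_filter] at hkmem
          have hklt : k < ay := by simpa using hkmem.2
          have hkle : k ≤ m := hmax k ((mem_yearsA rows k).mp hkmem.1) hklt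
          have hmle : m ≤ k := PySem.List.max?_isMax hmx m hmfilt
          have : k = m := by omega
          rw [this]
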